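-- pv_equiv track=rewrite | github.com/BogdanShevchenko/WikiPlanarization | support_functions.py | generate_stages
-- ===== SOURCE A (Python) =====
-- def generate_stages(n: int, final_file: str = 'final') -> list[tuple[str, ...], ...]:
--     """
--     Generate list of stages of calculations. First two stages are always ('title', ) and ('title', 'category') and last
--     always will be (<final_file>, )
--     :param n: number of infracategories (0 means that there will be only categories). Total amount of stage is n + 3
--     :param final_file: name of last stage (and resulting file)
--     :return: list of stage tuples
--     """
--     base = ('title', 'category', 'infra')
--     s = [base[:1], base[:-1]]
--     if n == 1:
--         s = s + [(base[1], base[2] + '1')]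
--     elif n > 1:
--         s = s + [(base[1], base[2] + '1')] + [(f'{base[2]}{i - 1}', f'{base[2]}{i}') for i in range(2, n + 1)]
--     return s + [(final_file, )]
-- ===== SOURCE B (Python) =====
-- def generate_stages(n: int, final_file: str = 'final') -> list[tuple[str, ...], ...]:
--     labels = ['title', 'category'] + [f'infra{i}' for i in range(1, n + 1)]
--     return [(labels[0],)] + list(zip(labels, labels[1:])) + [(final_file,)]
-- ===== Notes on version B (the rewrite author's own statement) =====
-- stated objective: simpler
-- what changed: B removes A's n==1 / n>1 branching: it builds one flat label list ['title','category','infra1',...,'infra<n>'] and forms the stages uniformly as the head singleton, consecutive-pair zip, and the final singleton.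
import Mathlib
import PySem

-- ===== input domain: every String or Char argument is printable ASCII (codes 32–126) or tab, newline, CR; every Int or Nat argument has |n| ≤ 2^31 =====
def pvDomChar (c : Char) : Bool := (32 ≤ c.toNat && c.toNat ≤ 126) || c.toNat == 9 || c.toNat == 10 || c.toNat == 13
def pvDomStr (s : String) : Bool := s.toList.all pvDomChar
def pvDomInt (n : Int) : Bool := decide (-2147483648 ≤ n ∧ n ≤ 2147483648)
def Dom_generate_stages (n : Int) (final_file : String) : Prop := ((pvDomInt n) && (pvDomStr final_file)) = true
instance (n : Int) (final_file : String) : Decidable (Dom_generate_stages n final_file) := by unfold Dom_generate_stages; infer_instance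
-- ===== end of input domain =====

-- B replaces A's n==1/n>1 special-casing by one flat label list paired by a consecutive zip (objective: simpler).

-- ===== PORT A =====
def generate_stages (n : Int) (final_file : String) : List (List String) :=
  -- base = ('title', 'category', 'infra'); s = [base[:1], base[:-1]]
  let base0 := "title"
  let base1 := "category"
  let base2 := "infra"
  let s : List (List String) := [[base0], [base0, base1]]
  let s :=
    if n = 1 then
      s ++ [[base1, base2 ++ "1"]]
    else if n > 1 then
      s ++ [[base1, base2 ++ "1"]] ++
        (PySem.List.pyRange 2 (n + 1) 1).map
          (fun i => [base2 ++ PySem.Int.toStr (i - 1), base2 ++ PySem.Int.toStr i])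
    else s
  s ++ [[final_file]]

-- ===== PORT B =====
def generate_stages_alt (n : Int) (final_file : String) : List (List String) :=
  let labels : List String :=
    ["title", "category"] ++ (PySem.List.pyRange 1 (n + 1) 1).map (fun i => "infra" ++ PySem.Int.toStr i)
  -- labels is never empty, so labels[0] is its head
  [[labels.headD ""]] ++ (labels.zip (labels.drop 1)).map (fun p => [p.1, p.2]) ++ [[final_file]]

-- ===== PRECONDITION & SPEC =====
def Spec_generate_stages (n : Int) (final_file : String) (out : List (List String)) : Prop := out = generate_stages_alt n final_file
instance (n : Int) (final_file : String) (out : List (List String)) : Decidable (Spec_generate_stages n final_file out) := by unfold Spec_generate_stages; infer_instance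

-- ===== CLAIM (what is proved, stated in full; the proofs are below) =====
def Claim_equal_generate_stages : Prop := ∀ (n : Int) (final_file : String), Dom_generate_stages n final_file → Spec_generate_stages n final_file (generate_stages n final_file)

-- ===== LEMMAS AND PROOFS =====

-- zipping a shifted copy of a mapped range pairs each f i with f (i-1)
theorem pv_zip_shift (f : Int → String) : ∀ (k : Nat) (a : Int),
    ((f (a - 1) :: (PySem.List.pyRange a (a + k) 1).map f).zip ((PySem.List.pyRange a (a + k) 1).map f))
      = (PySem.List.pyRange a (a + k) 1).map (fun i => (f (i - 1), f i)) := by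
  intro k
  induction k with
  | zero => intro a; simp [PySem.List.pyRange_one_eq_nil]
  | succ k ih =>
    intro a
    have hcons : PySem.List.pyRange a (a + (k + 1 : Nat)) 1 = a :: PySem.List.pyRange (a + 1) (a + (k + 1 : Nat)) 1 :=
      PySem.List.pyRange_one_cons (by push_cast; omega)
    have hb : a + ((k : Nat) + 1 : Nat) = (a + 1) + (k : Nat) := by push_cast; omega
    rw [hcons]
    simp only [List.map_cons, List.zip_cons_cons]
    rw [hb]
    have := ih (a + 1)
    simp only [add_sub_cancel_right] at this
    rw [this]

theorem generate_stages_eq_alt (n : Int) (f : String) : generate_stages n f = generate_stages_alt n f := by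
  by_cases hn : n ≤ 0
  · -- no infra stages at all
    have h1 : PySem.List.pyRange 1 (n + 1) 1 = [] := PySem.List.pyRange_one_eq_nil (by omega)
    simp only [generate_stages, generate_stages_alt, h1]
    rw [if_neg (by omega), if_neg (by omega)]
    simp
  · rw [not_le] at hn
    -- n ≥ 1 : A's two branches share the shape  prefix ++ map over pyRange 2 (n+1) ++ [[f]]
    have hA : generate_stages n f =
        [["title"], ["title", "category"], ["category", "infra1"]] ++
          (PySem.List.pyRange 2 (n + 1) 1).map
            (fun i => ["infra" ++ PySem.Int.toStr (i - 1), "infra" ++ PySem.Int.toStr i]) ++ [[f]] := by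
      unfold generate_stages
      split_ifs with h1 h2
      · subst h1
        rw [PySem.List.pyRange_one_eq_nil (by omega)]
        simp
      · simp
      · omega
    have hcons1 : PySem.List.pyRange 1 (n + 1) 1 = 1 :: PySem.List.pyRange 2 (n + 1) 1 := by
      have := PySem.List.pyRange_one_cons (a := 1) (b := n + 1) (by omega)
      simpa using this
    have hk : n + 1 = 2 + ((n - 1).toNat : Int) := by omega
    have hzip := pv_zip_shift (fun i => "infra" ++ PySem.Int.toStr i) (n - 1).toNat 2
    rw [← hk] at hzip
    rw [hA]
    unfold generate_stages_alt
    simp only [hcons1, List.map_cons, List.cons_append, List.nil_append, List.headD_cons,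
      List.drop_succ_cons, List.drop_zero, List.zip_cons_cons]
    have h21 : ((2 : Int) - 1) = 1 := by norm_num
    rw [h21] at hzip
    rw [hzip]
    simp [List.map_map]
    decide

-- ===== VERDICT (by name: the statement is the Claim_ definition above) =====
theorem generate_stages_spec : Claim_equal_generate_stages := by
  intro n f _
  unfold Spec_generate_stages
  exact generate_stages_eq_alt n f
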